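-- pv_equiv track=rewrite | github.com/serendipity019/PythonCF7 | chapter05/11_improve_2.py | categorize_grades
-- ===== SOURCE A (Python) =====
-- def categorize_grades(students_grades: dict)-> dict:
--     passed = {name: grade for name, grade in students_grades.items() if 5 <= grade < 10 }
--     failed = {name: grade for name, grade in students_grades.items() if grade < 5}
--     honors = {name: grade for name, grade in students_grades.items() if grade == 10}
--
--     return {
--         "Passed": passed,
--         "Failed": failed,
--         "Honors": honors
--     }
-- ===== SOURCE B (Python) =====
-- def categorize_grades(students_grades: dict) -> dict:
--     passed, failed, honors = {}, {}, {}
--     for name, grade in students_grades.items():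
--         if grade < 5:
--             failed[name] = grade
--         elif grade < 10:
--             passed[name] = grade
--         elif grade == 10:
--             honors[name] = grade
--     return {"Passed": passed, "Failed": failed, "Honors": honors}
-- ===== Notes on version B (the rewrite author's own statement) =====
-- stated objective: simpler
-- what changed: Replaces three separate comprehension passes over the dict with a single loop that dispatches each student once into one of the three buckets via an if/elif chain.
import Mathlib
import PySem

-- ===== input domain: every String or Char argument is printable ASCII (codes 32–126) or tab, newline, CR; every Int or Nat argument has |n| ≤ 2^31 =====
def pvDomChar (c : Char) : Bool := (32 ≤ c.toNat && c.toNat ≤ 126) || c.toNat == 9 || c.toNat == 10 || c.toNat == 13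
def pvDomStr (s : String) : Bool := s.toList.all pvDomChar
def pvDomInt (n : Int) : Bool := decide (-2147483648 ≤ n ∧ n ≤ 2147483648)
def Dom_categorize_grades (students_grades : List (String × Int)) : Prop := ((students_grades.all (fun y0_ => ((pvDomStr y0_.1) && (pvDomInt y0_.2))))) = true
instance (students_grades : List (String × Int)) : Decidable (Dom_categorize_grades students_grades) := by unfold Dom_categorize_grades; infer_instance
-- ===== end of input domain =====

-- B replaces A's three filtering passes with one loop dispatching each entry once (objective: simpler).

-- ===== PORT A =====
-- A: three dict comprehensions over students_grades.items(), then the result dict.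
def categorize_grades (students_grades : List (String × Int)) : List (String × List (String × Int)) :=
  let passed := students_grades.filter (fun p => decide (5 ≤ p.2 ∧ p.2 < 10))
  let failed := students_grades.filter (fun p => decide (p.2 < 5))
  let honors := students_grades.filter (fun p => decide (p.2 = 10))
  [("Passed", passed), ("Failed", failed), ("Honors", honors)]

-- ===== PORT B =====
-- B: single loop with three accumulators and an if/elif chain.
def categorize_grades_loop (sg : List (String × Int))
    (passed failed honors : List (String × Int)) :
    List (String × Int) × List (String × Int) × List (String × Int) :=
  match sg with
  | [] => (passed, failed, honors)
  | (name, grade) :: rest =>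
      if grade < 5 then
        categorize_grades_loop rest passed (failed ++ [(name, grade)]) honors
      else if grade < 10 then
        categorize_grades_loop rest (passed ++ [(name, grade)]) failed honors
      else if grade = 10 then
        categorize_grades_loop rest passed failed (honors ++ [(name, grade)])
      else
        categorize_grades_loop rest passed failed honors

def categorize_grades_alt (students_grades : List (String × Int)) : List (String × List (String × Int)) :=
  let r := categorize_grades_loop students_grades [] [] []
  [("Passed", r.1), ("Failed", r.2.1), ("Honors", r.2.2)]

-- ===== PRECONDITION & SPEC =====
def Spec_categorize_grades (students_grades : List (String × Int)) (out : List (String × List (String × Int))) : Prop := out = categorize_grades_alt students_grades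
instance (students_grades : List (String × Int)) (out : List (String × List (String × Int))) : Decidable (Spec_categorize_grades students_grades out) := by unfold Spec_categorize_grades; infer_instance

-- ===== CLAIM (what is proved, stated in full; the proofs are below) =====
def Claim_equal_categorize_grades : Prop := ∀ (students_grades : List (String × Int)), Dom_categorize_grades students_grades → Spec_categorize_grades students_grades (categorize_grades students_grades)

-- ===== LEMMAS AND PROOFS =====
theorem categorize_grades_loop_spec (sg : List (String × Int))
    (p f h : List (String × Int)) :
    categorize_grades_loop sg p f h =
      (p ++ sg.filter (fun q => decide (5 ≤ q.2 ∧ q.2 < 10)),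
       f ++ sg.filter (fun q => decide (q.2 < 5)),
       h ++ sg.filter (fun q => decide (q.2 = 10))) := by
  induction sg generalizing p f h with
  | nil => simp [categorize_grades_loop]
  | cons x rest ih =>
      obtain ⟨name, grade⟩ := x
      by_cases h1 : grade < 5
      · have p1 : (decide (5 ≤ grade ∧ grade < 10) : Bool) = false := by simp; omega
        have p2 : (decide (grade < 5) : Bool) = true := by simp [h1]
        have p3 : (decide (grade = 10) : Bool) = false := by simp; omega
        simp [categorize_grades_loop, h1, ih, List.filter_cons, p1, p2, p3]
      · by_cases h2 : grade < 10
        · have p1 : (decide (5 ≤ grade ∧ grade < 10) : Bool) = true := by simp; omega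
          have p2 : (decide (grade < 5) : Bool) = false := by simp [h1]
          have p3 : (decide (grade = 10) : Bool) = false := by simp; omega
          simp [categorize_grades_loop, h1, h2, ih, List.filter_cons, p1, p2, p3]
        · by_cases h3 : grade = 10
          · have p1 : (decide (5 ≤ grade ∧ grade < 10) : Bool) = false := by simp; omega
            have p2 : (decide (grade < 5) : Bool) = false := by simp [h1]
            have p3 : (decide (grade = 10) : Bool) = true := by simp [h3]
            simp [categorize_grades_loop, h1, h2, h3, ih, List.filter_cons, p1, p2, p3]
          · have p1 : (decide (5 ≤ grade ∧ grade < 10) : Bool) = false := by simp; omega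
            have p2 : (decide (grade < 5) : Bool) = false := by simp [h1]
            have p3 : (decide (grade = 10) : Bool) = false := by simp [h3]
            simp [categorize_grades_loop, h1, h2, h3, ih, List.filter_cons, p1, p2, p3]

-- ===== VERDICT (by name: the statement is the Claim_ definition above) =====
theorem categorize_grades_spec : Claim_equal_categorize_grades := by
  intro sg _
  unfold Spec_categorize_grades categorize_grades categorize_grades_alt
  simp [categorize_grades_loop_spec]
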